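-- pv_equiv track=rewrite | github.com/0xProject/p2p_incentives | incentive.py | findBestWorstLists
-- ===== SOURCE A (Python) =====
-- import itertools
--
-- def findBestWorstLists(sequence_of_lists):
--
--     last_effective_idx = -1
--     while last_effective_idx >= -len(sequence_of_lists[0]):
--         if any(item[last_effective_idx] is not None for item in sequence_of_lists):
--             break
--         last_effective_idx -= 1
--
--     if last_effective_idx == -len(sequence_of_lists[0]) - 1:
--         raise ValueError('All entries are None. Invalid to compare.')
--
--     it1, it2 = itertools.tee((item for item in sequence_of_lists if item[last_effective_idx] is not None), 2)
--     best_list = max(it1, key = lambda x: x[last_effective_idx])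
--     worst_list = min(it2, key = lambda x: x[last_effective_idx])
--
--     return (best_list, worst_list)
-- ===== SOURCE B (Python) =====
-- def findBestWorstLists(sequence_of_lists):
--     # For each row, the offset-from-the-right of its rightmost non-None entry;
--     # the effective column is the minimum such offset over all rows.
--     offsets = []
--     for row in sequence_of_lists:
--         for k in range(1, len(row) + 1):
--             if row[-k] is not None:
--                 offsets.append(k)
--                 break
--     if not offsets:
--         raise ValueError('All entries are None. Invalid to compare.')
--     idx = -min(offsets)
--     filtered = [row for row in sequence_of_lists if row[idx] is not None]
--     # stable sorts: first element of the reverse-sorted list is the first maximal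
--     # row, first element of the ascending sort is the first minimal row
--     best_list = sorted(filtered, key=lambda x: x[idx], reverse=True)[0]
--     worst_list = sorted(filtered, key=lambda x: x[idx])[0]
--     return (best_list, worst_list)
-- ===== Notes on version B (the rewrite author's own statement) =====
-- stated objective: alternative
-- what changed: B finds the effective column as the minimum over rows of each row's rightmost non-None offset (row-wise scans instead of A's right-to-left column-wise while loop), then picks the best and worst rows as the first elements of a stable descending and ascending sort of the filtered rows, instead of A's itertools.tee plus max()/min() passes.
import Mathlib
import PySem

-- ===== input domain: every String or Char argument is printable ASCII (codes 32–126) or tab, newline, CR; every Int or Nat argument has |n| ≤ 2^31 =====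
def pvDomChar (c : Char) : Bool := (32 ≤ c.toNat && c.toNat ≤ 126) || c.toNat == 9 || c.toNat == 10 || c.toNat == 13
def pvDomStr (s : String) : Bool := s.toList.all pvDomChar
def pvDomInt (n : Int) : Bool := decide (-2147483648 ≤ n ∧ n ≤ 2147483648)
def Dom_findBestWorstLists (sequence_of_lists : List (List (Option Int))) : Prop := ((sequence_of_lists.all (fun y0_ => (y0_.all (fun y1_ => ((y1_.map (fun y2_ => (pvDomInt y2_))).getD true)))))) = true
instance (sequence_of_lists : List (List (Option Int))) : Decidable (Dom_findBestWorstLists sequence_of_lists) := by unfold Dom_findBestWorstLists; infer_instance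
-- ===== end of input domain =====

-- B replaces A's right-to-left column scan + tee'd max/min passes by a row-wise computation
-- (each row's rightmost non-None offset, minimised) and two stable sorts whose first elements
-- are the best and worst rows (objective: alternative decomposition, same cost).

-- ===== PORT A =====
-- 'any(item[last_effective_idx] is not None for item in sequence_of_lists)';
-- pyGetD totalises item[idx] (in range on every input Pre_ admits).
def aAnyNonNone (sequence_of_lists : List (List (Option Int))) (idx : Int) : Bool :=
  sequence_of_lists.any (fun item => (PySem.List.pyGetD item idx none).isSome)

-- The while loop: idx starts at -1 and decreases by 1, so the condition
-- 'idx >= -len(sequence_of_lists[0])' fails exactly after 'width' iterations; fuel = width is exact.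
def aWhile (sequence_of_lists : List (List (Option Int))) : Nat → Int → Int
  | 0, idx => idx                        -- loop exits; idx has already reached -width-1
  | Nat.succ f, idx =>
      if aAnyNonNone sequence_of_lists idx then idx
      else aWhile sequence_of_lists f (idx - 1)

def findBestWorstLists (sequence_of_lists : List (List (Option Int))) : List (Option Int) × List (Option Int) :=
  -- len(sequence_of_lists[0]); the IndexError on [] is outside Pre_
  let width := (sequence_of_lists.headD []).length
  let last_effective_idx := aWhile sequence_of_lists width (-1)
  if last_effective_idx = -(width : Int) - 1 then
    ([], [])                             -- 'raise ValueError(...)': outside Pre_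
  else
    let filtered := sequence_of_lists.filter
      (fun item => (PySem.List.pyGetD item last_effective_idx none).isSome)
    -- key x[idx]: a non-None int on every compared row; '.getD 0' totalises the Option
    let key := fun (x : List (Option Int)) => (PySem.List.pyGetD x last_effective_idx none).getD 0
    ((PySem.List.max? filtered key).getD [], (PySem.List.min? filtered key).getD [])

-- ===== PORT B =====
-- inner 'for k in range(1, len(row)+1): if row[-k] is not None: offsets.append(k); break';
-- fuel = len(row) is exact; row[-k] is always in range here, so pyGetD is the exact value.
def bRowOffset (row : List (Option Int)) : Nat → Nat → Option Nat
  | 0, _ => none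
  | Nat.succ f, k =>
      if (PySem.List.pyGetD row (-(k : Int)) none).isSome then some k
      else bRowOffset row f (k + 1)

def findBestWorstLists_alt (sequence_of_lists : List (List (Option Int))) : List (Option Int) × List (Option Int) :=
  -- the offsets list: rows whose scan hits contribute their offset, in row order
  let offsets := sequence_of_lists.filterMap (fun row => bRowOffset row row.length 1)
  if offsets = [] then
    ([], [])                             -- 'raise ValueError(...)': outside Pre_
  else
    -- idx = -min(offsets); '.getD 0' totalises (offsets is nonempty on this branch)
    let idx : Int := -((PySem.List.min? offsets (fun y => y)).getD 0 : Nat)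
    let filtered := sequence_of_lists.filter
      (fun row => (PySem.List.pyGetD row idx none).isSome)
    let key := fun (x : List (Option Int)) => (PySem.List.pyGetD x idx none).getD 0
    -- sorted(...)[0]: pyGetD _ 0 [] totalises the indexing (filtered nonempty under Pre_)
    (PySem.List.pyGetD (PySem.List.sorted filtered key true) 0 [],
     PySem.List.pyGetD (PySem.List.sorted filtered key false) 0 [])

-- ===== PRECONDITION & SPEC =====
-- Pre_ is exactly where A returns: it excludes the empty outer list (IndexError on
-- sequence_of_lists[0]), inputs whose scanned columns are all None (ValueError), and ragged
-- inputs where a row shorter than the decided column depth makes item[idx] raise IndexError.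
def Pre_findBestWorstLists (sequence_of_lists : List (List (Option Int))) : Prop :=
  sequence_of_lists ≠ [] ∧
  ∃ k ∈ Finset.Icc 1 (sequence_of_lists.headD []).length,
    (∀ r ∈ sequence_of_lists, k ≤ r.length) ∧
    (∀ k' ∈ Finset.Ico 1 k, ∀ r ∈ sequence_of_lists,
        PySem.List.pyGetD r (-(k' : Int)) none = none) ∧
    (∃ r ∈ sequence_of_lists, (PySem.List.pyGetD r (-(k : Int)) none).isSome)
instance (sequence_of_lists : List (List (Option Int))) : Decidable (Pre_findBestWorstLists sequence_of_lists) := by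
  unfold Pre_findBestWorstLists; infer_instance

def pvWitness_findBestWorstLists : List (List (Option Int)) := [[some 1, none], [some 0, some 2]]

def Spec_findBestWorstLists (sequence_of_lists : List (List (Option Int))) (out : List (Option Int) × List (Option Int)) : Prop := out = findBestWorstLists_alt sequence_of_lists
instance (sequence_of_lists : List (List (Option Int))) (out : List (Option Int) × List (Option Int)) : Decidable (Spec_findBestWorstLists sequence_of_lists out) := by unfold Spec_findBestWorstLists; infer_instance

-- ===== CLAIM (what is proved, stated in full; the proofs are below) =====
def Claim_equal_findBestWorstLists : Prop := ∀ (sequence_of_lists : List (List (Option Int))), Dom_findBestWorstLists sequence_of_lists → Pre_findBestWorstLists sequence_of_lists → Spec_findBestWorstLists sequence_of_lists (findBestWorstLists sequence_of_lists)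

-- ===== LEMMAS AND PROOFS =====

-- A's while loop lands on -k, the first (rightmost) column with a non-None entry
lemma aWhile_hits (xs : List (List (Option Int))) (width k : Nat)
    (hkw : k ≤ width)
    (hlow : ∀ j, 1 ≤ j → j < k → aAnyNonNone xs (-(j : Int)) = false)
    (hhit : aAnyNonNone xs (-(k : Int)) = true) :
    ∀ d j, 1 ≤ j → j ≤ k → k - j = d → aWhile xs (width + 1 - j) (-(j : Int)) = -(k : Int) := by
  intro d
  induction d with
  | zero =>
    intro j h1 hjk hd
    have hjke : j = k := by omega
    subst hjke
    obtain ⟨f, hf⟩ : ∃ f, width + 1 - j = f + 1 := ⟨width - j, by omega⟩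
    rw [hf]
    simp [aWhile, hhit]
  | succ d ih =>
    intro j h1 hjk hd
    obtain ⟨f, hf⟩ : ∃ f, width + 1 - j = f + 1 := ⟨width - j, by omega⟩
    rw [hf]
    have hjlt : j < k := by omega
    have hstep : -(j : Int) - 1 = -((j + 1 : Nat) : Int) := by push_cast; ring
    have hfeq : f = width + 1 - (j + 1) := by omega
    rw [aWhile, hlow j h1 hjlt]
    simp only [hstep, hfeq]
    exact ih (j + 1) (by omega) (by omega) (by omega)

-- B's per-row scan: any result is a hit at or beyond the start offset
lemma bRowOffset_sound (row : List (Option Int)) :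
    ∀ (f j o : Nat), bRowOffset row f j = some o →
      j ≤ o ∧ (PySem.List.pyGetD row (-(o : Int)) none).isSome := by
  intro f
  induction f with
  | zero => intro j o h; simp [bRowOffset] at h
  | succ f ih =>
    intro j o h
    rw [bRowOffset] at h
    by_cases hj : (PySem.List.pyGetD row (-(j : Int)) none).isSome
    · rw [if_pos hj] at h
      obtain rfl : j = o := by simpa using h
      exact ⟨le_rfl, hj⟩
    · rw [if_neg hj] at h
      obtain ⟨h1, h2⟩ := ih (j + 1) o h
      exact ⟨by omega, h2⟩

-- B's per-row scan finds the first hit offset when it exists within the fuel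
lemma bRowOffset_hits (row : List (Option Int)) (k : Nat)
    (hhit : (PySem.List.pyGetD row (-(k : Int)) none).isSome)
    (hlow : ∀ j, 1 ≤ j → j < k → PySem.List.pyGetD row (-(j : Int)) none = none) :
    ∀ d f j, 1 ≤ j → j ≤ k → k - j = d → k ≤ j + f → bRowOffset row (f + 1) j = some k := by
  intro d
  induction d with
  | zero =>
    intro f j h1 hjk hd hfuel
    have : j = k := by omega
    subst this
    simp [bRowOffset, hhit]
  | succ d ih =>
    intro f j h1 hjk hd hfuel
    have hjlt : j < k := by omega
    have hnone := hlow j h1 hjlt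
    obtain ⟨f', hf'⟩ : ∃ f', f = f' + 1 := ⟨f - 1, by omega⟩
    rw [bRowOffset, if_neg (by simp [hnone]), hf']
    exact ih f' (j + 1) (by omega) (by omega) (by omega) (by omega)

-- head of an insertion step = one comparison against the old head
lemma head?_insertBy {α : Type} (before : α → α → Bool) (x : α) (acc : List α) :
    (PySem.List.insertBy before x acc).head?
      = (match acc.head? with
         | none => some x
         | some y => if before x y then some x else some y) := by
  cases acc with
  | nil => simp [PySem.List.insertBy]
  | cons y ys =>
    by_cases h : before x y <;> simp [PySem.List.insertBy, h]

-- head of the insertion-sort fold is the running-extremum fold over heads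
lemma foldl_insertBy_head? {α : Type} (before : α → α → Bool) :
    ∀ (l acc : List α),
      (l.foldl (fun a x => PySem.List.insertBy before x a) acc).head?
        = l.foldl (fun m x =>
            match m with
            | none => some x
            | some y => if before x y then some x else some y) acc.head? := by
  intro l
  induction l with
  | nil => intro acc; rfl
  | cons x t ih =>
    intro acc
    rw [List.foldl_cons, List.foldl_cons, ih, head?_insertBy]

-- Python's min(xs, key) is the head of the stable ascending sort
lemma min?_eq_head?_sorted {α : Type} (l : List α) (key : α → Int) :
    PySem.List.min? l key = (PySem.List.sorted l key false).head? := by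
  rw [PySem.List.sorted_eq_foldl_insertBy, foldl_insertBy_head?]
  simp only [PySem.List.min?, List.head?_nil]
  congr 1
  funext m x
  cases m <;> simp

-- Python's max(xs, key) is the head of the stable descending sort
lemma max?_eq_head?_sorted_rev {α : Type} (l : List α) (key : α → Int) :
    PySem.List.max? l key = (PySem.List.sorted l key true).head? := by
  rw [PySem.List.sorted_rev_eq_foldl_insertBy, foldl_insertBy_head?]
  simp only [PySem.List.max?, List.head?_nil]
  congr 1
  funext m x
  cases m <;> simp

-- ===== VERDICT (by name: the statement is the Claim_ definition above) =====
theorem findBestWorstLists_spec : Claim_equal_findBestWorstLists := by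
  unfold Claim_equal_findBestWorstLists
  intro xs _ hpre
  obtain ⟨hne, k, hk, hlen, hlow, hhit⟩ := hpre
  rw [Finset.mem_Icc] at hk
  set width := (xs.headD []).length with hwidth
  -- Bool forms of the column facts
  have hhitB : aAnyNonNone xs (-(k : Int)) = true := by
    simp only [aAnyNonNone, List.any_eq_true]
    obtain ⟨r, hr, hs⟩ := hhit
    exact ⟨r, hr, hs⟩
  have hlowB : ∀ j, 1 ≤ j → j < k → aAnyNonNone xs (-(j : Int)) = false := by
    intro j h1 hjk
    simp only [aAnyNonNone, List.any_eq_false]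
    intro r hr
    have := hlow j (Finset.mem_Ico.mpr ⟨h1, hjk⟩) r hr
    simp [this]
  -- A's column scan returns -k
  have hA : aWhile xs width (-1) = -(k : Int) := by
    have := aWhile_hits xs width k hk.2 hlowB hhitB (k - 1) 1 le_rfl hk.1 rfl
    simpa using this
  -- B's offsets list: every element is ≥ k and k occurs in it
  set offs := xs.filterMap (fun row => bRowOffset row row.length 1) with hoffs
  have hgek : ∀ o ∈ offs, k ≤ o := by
    intro o ho
    rw [hoffs, List.mem_filterMap] at ho
    obtain ⟨r, hr, hro⟩ := ho
    obtain ⟨_, hsome⟩ := bRowOffset_sound r r.length 1 o hro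
    by_contra hlt
    push Not at hlt
    obtain ⟨h1, _⟩ := bRowOffset_sound r r.length 1 o hro
    have := hlow o (Finset.mem_Ico.mpr ⟨h1, hlt⟩) r hr
    simp [this] at hsome
  have hkin : k ∈ offs := by
    obtain ⟨r, hr, hs⟩ := hhit
    rw [hoffs, List.mem_filterMap]
    refine ⟨r, hr, ?_⟩
    have hkr : k ≤ r.length := hlen r hr
    obtain ⟨f, hf⟩ : ∃ f, r.length = f + 1 := ⟨r.length - 1, by omega⟩
    rw [hf]
    exact bRowOffset_hits r k hs
      (fun j h1 hjk => hlow j (Finset.mem_Ico.mpr ⟨h1, hjk⟩) r hr)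
      (k - 1) f 1 le_rfl hk.1 rfl (by omega)
  have hoffsne : offs ≠ [] := fun h => by simp [h] at hkin
  -- min(offsets) = k
  have hmin : PySem.List.min? offs (fun y => y) = some k := by
    cases hm : PySem.List.min? offs (fun y => y) with
    | none => exact absurd ((PySem.List.min?_eq_none_iff _ _).mp hm) hoffsne
    | some m =>
      have h1 : m ∈ offs := PySem.List.min?_mem hm
      have h2 := PySem.List.min?_isMin hm k hkin
      have h3 := hgek m h1
      have hmk : m = k := le_antisymm (by simpa using h2) h3
      rw [hmk]
  -- assemble both sides
  unfold Spec_findBestWorstLists findBestWorstLists findBestWorstLists_alt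
  have hnotraise : ¬ (-(k : Int) = -(width : Int) - 1) := by omega
  simp only [← hwidth, hA, ← hoffs, hmin, if_neg hnotraise, if_neg hoffsne,
    Option.getD_some]
  -- the filtered rows are nonempty
  set p := fun row : List (Option Int) => (PySem.List.pyGetD row (-(k : Int)) none).isSome with hp
  have hfne : xs.filter p ≠ [] := by
    obtain ⟨r, hr, hs⟩ := hhit
    intro hnil
    have : r ∈ xs.filter p := List.mem_filter.mpr ⟨hr, hs⟩
    simp [hnil] at this
  -- max/min = heads of the two sorts
  rw [max?_eq_head?_sorted_rev, min?_eq_head?_sorted,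
    PySem.List.pyGetD_zero, PySem.List.pyGetD_zero]
  have hgd : ∀ (l : List (List (Option Int))), l.getD 0 [] = l.head?.getD [] := by
    intro l; cases l <;> rfl
  rw [hgd, hgd]
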